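-- pv_equiv track=rewrite | github.com/Sharvaree/KMeans_Experiments | mainCenter.py | splitalpha
-- ===== SOURCE A (Python) =====
-- def splitalpha(s):
-- 	pos = 0
-- 	last = 0
-- 	l = []
-- 	while pos < len(s):
-- 		while pos < len(s) and not s[pos].isalpha():
-- 			pos+=1
-- 		l.append(s[last:pos])
-- 		pos+=1
-- 		last = pos
-- 	return l
-- ===== SOURCE B (Python) =====
-- def splitalpha(s):
--     idx = [i for i, c in enumerate(s) if c.isalpha()]
--     res = []
--     last = 0
--     for i in idx:
--         res.append(s[last:i])
--         last = i + 1
--     if last < len(s):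
--         res.append(s[last:])
--     return res
-- ===== Notes on version B (the rewrite author's own statement) =====
-- stated objective: alternative
-- what changed: Replaces A's nested while-loops with index-pointer state by first building the list of alphabetic (delimiter) positions via enumerate and then a separate slicing pass over that index table, with a final-remainder guard.
import Mathlib
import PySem

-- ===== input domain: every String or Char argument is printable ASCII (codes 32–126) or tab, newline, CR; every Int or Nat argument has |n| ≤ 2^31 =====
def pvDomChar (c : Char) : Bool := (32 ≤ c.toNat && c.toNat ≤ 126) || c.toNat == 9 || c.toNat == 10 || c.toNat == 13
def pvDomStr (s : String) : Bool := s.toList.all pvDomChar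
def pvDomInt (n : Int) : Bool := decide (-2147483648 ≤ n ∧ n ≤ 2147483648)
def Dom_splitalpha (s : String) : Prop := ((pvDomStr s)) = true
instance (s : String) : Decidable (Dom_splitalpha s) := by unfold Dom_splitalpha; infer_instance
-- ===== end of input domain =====

-- B builds the list of alphabetic (delimiter) positions first, then slices between
-- them in a second pass with a final-remainder guard; A is a single nested-while scan.

-- ===== PORT A =====
-- inner while loop: advance pos while s[pos] is not alphabetic
def skipA (cs : List Char) (pos : Nat) : Nat :=
  if h : pos < cs.length then
    if PySem.Chars.isalpha cs[pos] then pos else skipA cs (pos + 1)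
  else pos
termination_by cs.length - pos

theorem skipA_ge (cs : List Char) (pos : Nat) : pos ≤ skipA cs pos := by
  unfold skipA
  split
  · split
    · exact le_refl _
    · have := skipA_ge cs (pos + 1); omega
  · exact le_refl _
termination_by cs.length - pos

-- outer while loop of A
def loopA (cs : List Char) (pos last : Nat) (acc : List String) : List String :=
  if _h : pos < cs.length then
    let p := skipA cs pos
    loopA cs (p + 1) (p + 1)
      (acc ++ [String.ofList (PySem.List.slice cs (some (last : Int)) (some (p : Int)))])
  else acc
termination_by cs.length - pos
decreasing_by have := skipA_ge cs pos; omega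

def splitalpha (s : String) : List String := loopA s.toList 0 0 []

-- ===== PORT B =====
def splitalpha_alt (s : String) : List String :=
  let cs := s.toList
  let idx := ((PySem.List.enumerate cs 0).filter (fun p => PySem.Chars.isalpha p.2)).map Prod.fst
  let st := idx.foldl
    (fun (st : Int × List String) i =>
      (i + 1, st.2 ++ [String.ofList (PySem.List.slice cs (some st.1) (some i))]))
    ((0 : Int), ([] : List String))
  if st.1 < (cs.length : Int) then
    st.2 ++ [String.ofList (PySem.List.slice cs (some st.1) none)]
  else st.2

-- ===== PRECONDITION & SPEC =====
def Spec_splitalpha (s : String) (out : List String) : Prop := out = splitalpha_alt s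
instance (s : String) (out : List String) : Decidable (Spec_splitalpha s out) := by unfold Spec_splitalpha; infer_instance

-- ===== CLAIM (what is proved, stated in full; the proofs are below) =====
def Claim_equal_splitalpha : Prop := ∀ (s : String), Dom_splitalpha s → Spec_splitalpha s (splitalpha s)

-- ===== LEMMAS AND PROOFS =====

-- positions (offset by p) of the alphabetic characters of cs
def alphaIdx : List Char → Nat → List Nat
  | [], _ => []
  | c :: cs, p =>
    if PySem.Chars.isalpha c then p :: alphaIdx cs (p + 1) else alphaIdx cs (p + 1)

-- the common value both programs compute from the delimiter-position list
def tailB (cs : List Char) : List Nat → Nat → List String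
  | [], last =>
    if last < cs.length then [String.ofList (PySem.List.slice cs (some (last : Int)) none)] else []
  | i :: rest, last =>
    String.ofList (PySem.List.slice cs (some (last : Int)) (some (i : Int))) :: tailB cs rest (i + 1)

theorem enum_filter_eq_alphaIdx (cs : List Char) (p : Nat) :
    ((PySem.List.enumerate cs (p : Int)).filter (fun q => PySem.Chars.isalpha q.2)).map Prod.fst
      = (alphaIdx cs p).map (Nat.cast : Nat → Int) := by
  induction cs generalizing p with
  | nil => simp [PySem.List.enumerate_nil, alphaIdx]
  | cons c cs ih =>
    rw [PySem.List.enumerate_cons,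
      show ((p : Int) + 1) = ((p + 1 : Nat) : Int) by push_cast; ring]
    have h1 := ih (p + 1)
    push_cast at h1
    by_cases h : PySem.Chars.isalpha c <;> simp [alphaIdx, h, h1]

theorem foldB_eq_tailB (cs : List Char) (idxs : List Nat) (last : Nat) (acc : List String) :
    (let st := (idxs.map (Nat.cast : Nat → Int)).foldl
        (fun (st : Int × List String) i =>
          (i + 1, st.2 ++ [String.ofList (PySem.List.slice cs (some st.1) (some i))]))
        ((last : Int), acc)
      if st.1 < (cs.length : Int) then
        st.2 ++ [String.ofList (PySem.List.slice cs (some st.1) none)]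
      else st.2)
    = acc ++ tailB cs idxs last := by
  induction idxs generalizing last acc with
  | nil =>
    simp only [List.map_nil, List.foldl_nil, tailB]
    split_ifs with h1 h2 h2
    · rfl
    · exact absurd (by exact_mod_cast h1) h2
    · exact absurd (by exact_mod_cast h2) h1
    · simp
  | cons i rest ih =>
    simp only [List.map_cons, List.foldl_cons, tailB]
    rw [show ((i : Int) + 1) = ((i + 1 : Nat) : Int) by push_cast; ring, ih]
    simp

-- characterisation of the inner while loop by the delimiter-position list
theorem skipA_char (cs : List Char) (p : Nat) (hp : p ≤ cs.length) :
    (alphaIdx (cs.drop p) p = [] ∧ skipA cs p = cs.length) ∨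
    (∃ q rest, alphaIdx (cs.drop p) p = q :: rest ∧ skipA cs p = q ∧ q < cs.length ∧
      rest = alphaIdx (cs.drop (q + 1)) (q + 1)) := by
  by_cases h : p < cs.length
  · rw [List.drop_eq_getElem_cons h]
    by_cases ha : PySem.Chars.isalpha cs[p]
    · right
      exact ⟨p, alphaIdx (cs.drop (p + 1)) (p + 1),
        by simp [alphaIdx, ha], by unfold skipA; simp [h, ha], h, rfl⟩
    · have hrec := skipA_char cs (p + 1) (by omega)
      have hs : skipA cs p = skipA cs (p + 1) := by
        conv_lhs => rw [skipA]
        simp [h, ha]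
      have hi : alphaIdx (cs[p] :: cs.drop (p + 1)) p = alphaIdx (cs.drop (p + 1)) (p + 1) := by
        simp [alphaIdx, ha]
      rw [hi, hs]
      exact hrec
  · left
    have hpe : p = cs.length := by omega
    constructor
    · rw [List.drop_eq_nil_of_le (by omega)]; rfl
    · unfold skipA; simp [hpe]
termination_by cs.length - p

theorem loopA_stop (cs : List Char) (pos last : Nat) (acc : List String)
    (h : ¬ pos < cs.length) : loopA cs pos last acc = acc := by
  rw [loopA]; simp [h]

theorem loopA_eq_tailB (cs : List Char) (n p : Nat) (acc : List String)
    (hn : cs.length - p ≤ n) :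
    loopA cs p p acc = acc ++ tailB cs (alphaIdx (cs.drop p) p) p := by
  induction n generalizing p acc with
  | zero =>
    have hp : cs.length ≤ p := by omega
    rw [List.drop_eq_nil_of_le hp, loopA_stop cs p p acc (by omega)]
    simp [alphaIdx, tailB, Nat.not_lt.mpr hp]
  | succ n ih =>
    by_cases h : p < cs.length
    · rcases skipA_char cs p (by omega) with ⟨hnil, hskip⟩ | ⟨q, rest, hcons, hskip, hq, hrest⟩
      · rw [hnil]
        rw [loopA]
        simp only [h, dif_pos, hskip]
        rw [loopA_stop cs (cs.length + 1) (cs.length + 1) _ (by omega)]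
        simp only [tailB, h, if_pos]
        congr 2
        rw [PySem.List.slice_natCast, PySem.List.slice_from_natCast]
        exact congrArg String.ofList (List.take_of_length_le (by simp))
      · have hpq : p ≤ q := hskip ▸ skipA_ge cs p
        rw [hcons, loopA]
        simp only [h, dif_pos, hskip]
        rw [ih (q + 1) _ (by omega), hrest, tailB]
        rw [List.append_assoc]
        rfl
    · have hp : cs.length ≤ p := by omega
      rw [List.drop_eq_nil_of_le hp, loopA_stop cs p p acc (by omega)]
      simp [alphaIdx, tailB, Nat.not_lt.mpr hp]

-- ===== VERDICT (by name: the statement is the Claim_ definition above) =====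
theorem splitalpha_spec : Claim_equal_splitalpha := by
  intro s _
  unfold Spec_splitalpha splitalpha splitalpha_alt
  rw [loopA_eq_tailB s.toList s.toList.length 0 [] (by omega)]
  simp only [List.drop_zero, List.nil_append]
  rw [show (0 : Int) = ((0 : Nat) : Int) from rfl, enum_filter_eq_alphaIdx]
  exact (foldB_eq_tailB s.toList (alphaIdx s.toList 0) 0 []).symm
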